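-- pv_equiv track=rewrite | github.com/981377660LMT/algorithm-study | 19_数学/因数筛/每个数的倍数有多少个.py | countMulti
-- ===== SOURCE A (Python) =====
-- from typing import List
--
-- def countMulti(nums: List[int]) -> List[int]:
--     """对于每个数，原数组中有多少个他的倍数."""
--     upper = max(nums) + 1
--     c1, c2 = [0] * upper, [0] * upper
--     for v in nums:
--         c1[v] += 1
--     for f in range(1, upper):
--         for m in range(f, upper, f):
--             c2[f] += c1[m]
--     return c2
-- ===== SOURCE B (Python) =====
-- from typing import List
--
-- def countMulti(nums: List[int]) -> List[int]:
--     """对于每个数，原数组中有多少个他的倍数."""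
--     upper = max(nums) + 1
--     c1, c2 = [0] * upper, [0] * upper
--     for v in nums:
--         c1[v] += 1
--     for m in range(1, upper):
--         cnt = c1[m]
--         if cnt:
--             d = 1
--             while d * d <= m:
--                 if m % d == 0:
--                     c2[d] += cnt
--                     q = m // d
--                     if q != d:
--                         c2[q] += cnt
--                 d += 1
--     return c2
-- ===== Notes on version B (the rewrite author's own statement) =====
-- stated objective: alternative
-- what changed: Instead of sweeping, for every factor f, all multiples of f (a harmonic double loop over the whole range), B builds the same count array c1 and then, for each value m actually present, enumerates the divisors of m by trial division up to sqrt(m) and adds c1[m] to each divisor's cell once; this trades A's O(U log U) sweep for O(U + k*sqrt(U)) work, cheaper for sparse value sets but costlier for dense ones.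
import Mathlib
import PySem

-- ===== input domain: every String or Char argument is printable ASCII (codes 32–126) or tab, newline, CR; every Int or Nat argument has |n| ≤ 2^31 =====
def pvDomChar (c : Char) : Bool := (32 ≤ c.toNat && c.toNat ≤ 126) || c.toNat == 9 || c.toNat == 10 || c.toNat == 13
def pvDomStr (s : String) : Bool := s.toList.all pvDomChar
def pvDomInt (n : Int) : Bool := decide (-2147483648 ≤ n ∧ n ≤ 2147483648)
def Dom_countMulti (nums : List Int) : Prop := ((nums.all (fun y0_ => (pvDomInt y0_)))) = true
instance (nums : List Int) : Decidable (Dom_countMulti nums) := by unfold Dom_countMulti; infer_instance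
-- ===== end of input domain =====

-- B replaces A's harmonic sweep over all multiples of every factor by, for each present value m,
-- one trial-division enumeration of m's divisors up to sqrt(m): a different traversal of the same
-- divisor pairs (cheaper when few distinct values are present, costlier when the range is dense).
-- Both ports share the identical first loop building c1 (helper pvBuildC1), as both Pythons do.

-- ===== PORT A =====
-- upper = max(nums)+1; c1 = [0]*upper; for v in nums: c1[v] += 1   (shared verbatim by both Pythons)
def pvBuildC1 (nums : List Int) (upper : Int) : List Int :=
  nums.foldl (fun c1 v => PySem.List.pySetD c1 v (PySem.List.pyGetD c1 v 0 + 1))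
    (List.replicate upper.toNat 0)

def countMulti (nums : List Int) : List Int :=
  match PySem.List.max? nums (fun x => x) with
  | none => []   -- max(nums) raises ValueError on []; excluded by Pre_countMulti
  | some mx =>
    let upper := mx + 1
    let c1 := pvBuildC1 nums upper
    (PySem.List.pyRange 1 upper 1).foldl (fun c2 f =>
        (PySem.List.pyRange f upper f).foldl (fun c2 m =>
            PySem.List.pySetD c2 f (PySem.List.pyGetD c2 f 0 + PySem.List.pyGetD c1 m 0)) c2)
      (List.replicate upper.toNat 0)

-- ===== PORT B =====
-- the 'while d*d <= m' trial-division loop of Source B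
def pvDivLoop (m cnt : Int) (d : Int) (c2 : List Int) : List Int :=
  if _h : d * d ≤ m then
    pvDivLoop m cnt (d + 1)
      (if PySem.Int.mod m d = 0 then
        let c2a := PySem.List.pySetD c2 d (PySem.List.pyGetD c2 d 0 + cnt)
        let q := PySem.Int.floordiv m d
        if q ≠ d then PySem.List.pySetD c2a q (PySem.List.pyGetD c2a q 0 + cnt) else c2a
      else c2)
  else c2
termination_by (m + 1 - d).toNat
decreasing_by
  have hdm : d ≤ m := by nlinarith [sq_nonneg d, sq_nonneg (d - 1)]
  omega

def countMulti_alt (nums : List Int) : List Int :=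
  match PySem.List.max? nums (fun x => x) with
  | none => []   -- max(nums) raises ValueError on []; excluded by Pre_countMulti
  | some mx =>
    let upper := mx + 1
    let c1 := pvBuildC1 nums upper
    (PySem.List.pyRange 1 upper 1).foldl (fun c2 m =>
        if PySem.List.pyGetD c1 m 0 ≠ 0 then pvDivLoop m (PySem.List.pyGetD c1 m 0) 1 c2 else c2)
      (List.replicate upper.toNat 0)

-- ===== PRECONDITION & SPEC =====
-- Pre_ excludes exactly the inputs where A raises: the empty list (max() raises ValueError),
-- lists whose maximum is negative (c1 is empty, so c1[v] += 1 raises IndexError), and lists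
-- containing some v < -(max+1) (negative index out of range, IndexError).
def Pre_countMulti (nums : List Int) : Prop :=
  nums ≠ [] ∧ ∃ mx ∈ nums, 0 ≤ mx ∧ ∀ v ∈ nums, v ≤ mx ∧ -(mx + 1) ≤ v
instance (nums : List Int) : Decidable (Pre_countMulti nums) := by unfold Pre_countMulti; infer_instance

def pvWitness_countMulti : List Int := [2, 6, -1, 6, 0]

def Spec_countMulti (nums : List Int) (out : List Int) : Prop := out = countMulti_alt nums
instance (nums : List Int) (out : List Int) : Decidable (Spec_countMulti nums out) := by unfold Spec_countMulti; infer_instance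

-- ===== CLAIM (what is proved, stated in full; the proofs are below) =====
def Claim_equal_countMulti : Prop := ∀ (nums : List Int), Dom_countMulti nums → Pre_countMulti nums → Spec_countMulti nums (countMulti nums)

-- ===== LEMMAS AND PROOFS =====

-- step: one "c2[j] += x" at nonneg index j
lemma pvSStep (c2 : List Int) (j x : Int) (hj : 0 ≤ j) (i : Nat) :
    (PySem.List.pySetD c2 j (PySem.List.pyGetD c2 j 0 + x)).getD i 0
      = c2.getD i 0 + (if (i : Int) = j ∧ j < (c2.length : Int) then x else 0) := by
  rw [PySem.List.pySetD_of_nonneg _ _ hj]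
  by_cases hlt : j < (c2.length : Int)
  · have hjn : j.toNat < c2.length := by omega
    rw [PySem.List.pyGetD_eq_getElem _ _ hj (by omega)]
    by_cases hij : (i : Int) = j
    · have : i = j.toNat := by omega
      subst this
      simp [List.getD_eq_getElem?_getD, hjn, hij, hlt]
    · have hne : j.toNat ≠ i := by omega
      simp [List.getD_eq_getElem?_getD, List.getElem?_set_ne hne, hij]
  · have : c2.length ≤ j.toNat := by omega
    rw [List.set_eq_of_length_le this]
    have : ¬((i : Int) = j ∧ j < (c2.length : Int)) := by omega
    simp [this]

-- generic pointwise fold: each step adds a state-independent contribution per index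
lemma pvFoldPt {α : Type} (L : List α) (step : List Int → α → List Int)
    (contrib : α → Nat → Int) (N : Nat)
    (hstep : ∀ c2 a, a ∈ L → c2.length = N →
      (step c2 a).length = N ∧ ∀ i : Nat, (step c2 a).getD i 0 = c2.getD i 0 + contrib a i) :
    ∀ c2, c2.length = N →
      (L.foldl step c2).length = N ∧
      ∀ i : Nat, (L.foldl step c2).getD i 0 = c2.getD i 0 + (L.map (fun a => contrib a i)).sum := by
  induction L with
  | nil => intro c2 h; simpa using h
  | cons a L ih =>
    intro c2 h
    have h1 := hstep c2 a (by simp) h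
    have h2 := ih (fun c2 b hb => hstep c2 b (by simp [hb])) (step c2 a) h1.1
    refine ⟨h2.1, fun i => ?_⟩
    rw [List.foldl_cons] at *
    rw [h2.2 i, h1.2 i]
    simp [add_assoc]

-- indicator identity for one trial-division step
lemma pvIndStep (m d e : Int) (hm : 1 ≤ m) (hd : 1 ≤ d) (hdd : d * d ≤ m) (he : 0 ≤ e) (cnt : Int) :
    (if e ∣ m ∧ 1 ≤ e ∧ d ≤ min e (m / e) then cnt else 0)
      = (if d ∣ m ∧ (e = d ∨ (e = m / d ∧ m / d ≠ d)) then cnt else 0)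
        + (if e ∣ m ∧ 1 ≤ e ∧ d + 1 ≤ min e (m / e) then cnt else 0) := by
  by_cases hP : e ∣ m ∧ 1 ≤ e
  · obtain ⟨hdvd, he1⟩ := hP
    have hr1 : e * (m / e) = m := Int.mul_ediv_cancel' hdvd
    set q := m / e with hq
    have hq1 : 1 ≤ q := by nlinarith
    have htriv : e ∣ m ∧ 1 ≤ e := ⟨hdvd, he1⟩
    by_cases h2 : d + 1 ≤ min e q
    · have h1 : d ≤ min e q := by omega
      have hhead : ¬(d ∣ m ∧ (e = d ∨ (e = m / d ∧ m / d ≠ d))) := by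
        rintro ⟨hddvd, rfl | ⟨hed, hne⟩⟩
        · omega
        · have hm' : m = d * e := by rw [hed]; exact (Int.mul_ediv_cancel' hddvd).symm
          have : q = d := by
            rw [hq, hm', mul_comm d e]
            exact Int.mul_ediv_cancel_left _ (by omega : e ≠ 0)
          omega
      rw [if_pos ⟨htriv.1, htriv.2, h1⟩, if_neg hhead, if_pos ⟨htriv.1, htriv.2, h2⟩]
      ring
    · by_cases h1 : d ≤ min e q
      · have hhead : d ∣ m ∧ (e = d ∨ (e = m / d ∧ m / d ≠ d)) := by
          rcases le_or_gt e q with hle | hlt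
          · have : e = d := by omega
            exact ⟨this ▸ hdvd, Or.inl this⟩
          · have hqd : q = d := by omega
            have hqdvd : q ∣ m := Dvd.intro e (by linarith [hr1])
            have hmd : m / q = e := by
              rw [← hr1]
              exact Int.mul_ediv_cancel _ (by omega : q ≠ 0)
            refine ⟨hqd ▸ hqdvd, Or.inr ⟨by rw [← hqd, hmd], by rw [← hqd, hmd]; omega⟩⟩
        rw [if_pos ⟨htriv.1, htriv.2, h1⟩, if_pos hhead, if_neg (fun h => h2 h.2.2)]
        ring
      · have hhead : ¬(d ∣ m ∧ (e = d ∨ (e = m / d ∧ m / d ≠ d))) := by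
          rintro ⟨hddvd, rfl | ⟨hed, hne⟩⟩
          · have : e ≤ q := by
              rw [hq]
              exact (Int.le_ediv_iff_mul_le (by omega)).mpr (by nlinarith)
            omega
          · have hm' : m = d * e := by rw [hed]; exact (Int.mul_ediv_cancel' hddvd).symm
            have hqd : q = d := by
              rw [hq, hm', mul_comm d e]
              exact Int.mul_ediv_cancel_left _ (by omega : e ≠ 0)
            have : d ≤ e := by
              rw [hed]
              exact (Int.le_ediv_iff_mul_le (by omega)).mpr hdd
            omega
        rw [if_neg (fun h => h1 h.2.2), if_neg hhead, if_neg (fun h => h1 (by have := h.2.2; omega))]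
        ring
  · have c1 : ¬(e ∣ m ∧ 1 ≤ e ∧ d ≤ min e (m / e)) := fun h => hP ⟨h.1, h.2.1⟩
    have c3 : ¬(e ∣ m ∧ 1 ≤ e ∧ d + 1 ≤ min e (m / e)) := fun h => hP ⟨h.1, h.2.1⟩
    have c2 : ¬(d ∣ m ∧ (e = d ∨ (e = m / d ∧ m / d ≠ d))) := by
      rintro ⟨hddvd, h | ⟨h, hne⟩⟩
      · exact hP ⟨h ▸ hddvd, by omega⟩
      · subst h
        have h1 : d * (m / d) = m := Int.mul_ediv_cancel' hddvd
        have : m / d ∣ m := Dvd.intro d (by linarith [h1])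
        have : 1 ≤ m / d := by nlinarith
        exact hP ⟨‹m / d ∣ m›, this⟩
    rw [if_neg c1, if_neg c2, if_neg c3]; ring

-- pointwise effect of the whole trial-division loop (fuel induction)
lemma pvDivLoopPtAux (m cnt : Int) (hm : 1 ≤ m) :
    ∀ (n : Nat) (d : Int) (c2 : List Int), (m + 1 - d).toNat ≤ n → 1 ≤ d → m < (c2.length : Int) →
      (pvDivLoop m cnt d c2).length = c2.length ∧
      ∀ i : Nat, (pvDivLoop m cnt d c2).getD i 0
        = c2.getD i 0 + (if ((i:Int) ∣ m ∧ 1 ≤ (i:Int) ∧ d ≤ min (i:Int) (m / (i:Int))) then cnt else 0) := by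
  intro n
  induction n with
  | zero =>
    intro d c2 hn hd hlen
    have hdm1 : m + 1 ≤ d := by omega
    have h : ¬ d * d ≤ m := by nlinarith
    rw [pvDivLoop, dif_neg h]
    refine ⟨rfl, fun i => ?_⟩
    have hni : ¬((i:Int) ∣ m ∧ 1 ≤ (i:Int) ∧ d ≤ min (i:Int) (m / (i:Int))) := by
      rintro ⟨hdvd, h1, h2⟩
      have hr1 : (i:Int) * (m / (i:Int)) = m := Int.mul_ediv_cancel' hdvd
      have : d * d ≤ m := by nlinarith [le_min_iff.mp h2]
      omega
    rw [if_neg hni]; ring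
  | succ n ih =>
    intro d c2 hn hd hlen
    rw [pvDivLoop]
    by_cases h : d * d ≤ m
    · rw [dif_pos h]
      set c2' := (if PySem.Int.mod m d = 0 then
          let c2a := PySem.List.pySetD c2 d (PySem.List.pyGetD c2 d 0 + cnt)
          let q := PySem.Int.floordiv m d
          if q ≠ d then PySem.List.pySetD c2a q (PySem.List.pyGetD c2a q 0 + cnt) else c2a
        else c2) with hc2'
      have hdm : d ≤ m := by nlinarith
      have hlen' : c2'.length = c2.length := by
        rw [hc2']
        by_cases h0 : PySem.Int.mod m d = 0
        · rw [if_pos h0]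
          dsimp only
          split_ifs <;> simp [PySem.List.length_pySetD]
        · rw [if_neg h0]
      have hpt : ∀ i : Nat, c2'.getD i 0 = c2.getD i 0
          + (if d ∣ m ∧ ((i:Int) = d ∨ ((i:Int) = m / d ∧ m / d ≠ d)) then cnt else 0) := by
        intro i
        rw [hc2']
        by_cases hdvd : PySem.Int.mod m d = 0
        · have hdvd' : d ∣ m := (PySem.Int.mod_eq_zero_iff_dvd m d).mp hdvd
          have hq : PySem.Int.floordiv m d = m / d := PySem.Int.floordiv_eq_ediv_of_pos (by omega)
          have hqle : m / d ≤ m := Int.ediv_le_self d (by omega)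
          have hq0 : 0 ≤ m / d := Int.ediv_nonneg (by omega) (by omega)
          rw [if_pos hdvd]
          simp only [hq]
          by_cases hne : m / d ≠ d
          · rw [if_pos hne]
            rw [pvSStep _ _ _ (by omega), pvSStep _ _ _ (by omega), PySem.List.length_pySetD]
            have e1 : (((i:Int) = d ∧ d < (c2.length:Int)) ↔ ((i:Int) = d)) :=
              ⟨fun h => h.1, fun h => ⟨h, by omega⟩⟩
            have e2 : (((i:Int) = m / d ∧ m / d < (c2.length:Int)) ↔ ((i:Int) = m / d)) :=
              ⟨fun h => h.1, fun h => ⟨h, by omega⟩⟩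
            rw [if_congr e1 rfl rfl, if_congr e2 rfl rfl]
            by_cases h1 : (i:Int) = d <;> by_cases h2 : (i:Int) = m / d <;>
              simp [h1, h2, hne, hdvd'] <;> omega
          · rw [if_neg hne]
            rw [pvSStep _ _ _ (by omega)]
            have e1 : (((i:Int) = d ∧ d < (c2.length:Int)) ↔ ((i:Int) = d)) :=
              ⟨fun h => h.1, fun h => ⟨h, by omega⟩⟩
            rw [if_congr e1 rfl rfl]
            push_neg at hne
            by_cases h1 : (i:Int) = d <;> simp [h1, hne, hdvd']
        · rw [if_neg hdvd]
          have hdvd' : ¬ d ∣ m := fun hx => hdvd ((PySem.Int.mod_eq_zero_iff_dvd m d).mpr hx)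
          simp [hdvd']
      have hfuel : (m + 1 - (d + 1)).toNat ≤ n := by omega
      have hlen2 : m < (c2'.length : Int) := by omega
      obtain ⟨ihlen, ihpt⟩ := ih (d + 1) c2' hfuel (by omega) hlen2
      refine ⟨by omega, fun i => ?_⟩
      rw [ihpt i, hpt i, pvIndStep m d (i:Int) hm hd h (by omega) cnt]
      ring
    · rw [dif_neg h]
      refine ⟨rfl, fun i => ?_⟩
      have hni : ¬((i:Int) ∣ m ∧ 1 ≤ (i:Int) ∧ d ≤ min (i:Int) (m / (i:Int))) := by
        rintro ⟨hdvd, h1, h2⟩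
        have hr1 : (i:Int) * (m / (i:Int)) = m := Int.mul_ediv_cancel' hdvd
        have : d * d ≤ m := by nlinarith [le_min_iff.mp h2]
        omega
      rw [if_neg hni]; ring

lemma pvDivLoopPt (m cnt : Int) (hm : 1 ≤ m) (d : Int) (c2 : List Int)
    (hd : 1 ≤ d) (hlen : m < (c2.length : Int)) :
    (pvDivLoop m cnt d c2).length = c2.length ∧
    ∀ i : Nat, (pvDivLoop m cnt d c2).getD i 0
      = c2.getD i 0 + (if ((i:Int) ∣ m ∧ 1 ≤ (i:Int) ∧ d ≤ min (i:Int) (m / (i:Int))) then cnt else 0) :=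
  pvDivLoopPtAux m cnt hm (m + 1 - d).toNat d c2 le_rfl hd hlen

lemma pvGetDReplicate (i n : Nat) : (List.replicate n (0:Int)).getD i 0 = 0 := by
  simp [List.getD_eq_getElem?_getD, List.getElem?_replicate]
  split <;> simp

lemma pvSumIf (C : Prop) [Decidable C] (G : Int → Int) (l : List Int) :
    (l.map (fun m => if C then G m else 0)).sum = if C then (l.map G).sum else 0 := by
  by_cases h : C <;> simp [h]

-- A's outer/inner double loop, pointwise
lemma pvASide (G : Int → Int) (u : Int) (N : Nat) (hN : (N : Int) = u) :
    ((PySem.List.pyRange 1 u 1).foldl (fun c2 f =>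
        (PySem.List.pyRange f u f).foldl (fun c2 m =>
            PySem.List.pySetD c2 f (PySem.List.pyGetD c2 f 0 + G m)) c2)
      (List.replicate N 0)).length = N ∧
    ∀ i : Nat, ((PySem.List.pyRange 1 u 1).foldl (fun c2 f =>
        (PySem.List.pyRange f u f).foldl (fun c2 m =>
            PySem.List.pySetD c2 f (PySem.List.pyGetD c2 f 0 + G m)) c2)
      (List.replicate N 0)).getD i 0
      = ((PySem.List.pyRange 1 u 1).map (fun f =>
          if (i : Int) = f then ((PySem.List.pyRange f u f).map G).sum else 0)).sum := by
  have hinner : ∀ (f : Int), 0 ≤ f → f < u → ∀ (l : List Int) (c2 : List Int), c2.length = N →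
      (l.foldl (fun c2 m => PySem.List.pySetD c2 f (PySem.List.pyGetD c2 f 0 + G m)) c2).length = N ∧
      ∀ i : Nat, (l.foldl (fun c2 m => PySem.List.pySetD c2 f (PySem.List.pyGetD c2 f 0 + G m)) c2).getD i 0
        = c2.getD i 0 + (if (i : Int) = f then (l.map G).sum else 0) := by
    intro f hf hfu l c2 hc2
    have := pvFoldPt l (fun c2 m => PySem.List.pySetD c2 f (PySem.List.pyGetD c2 f 0 + G m))
      (fun m i => if (i : Int) = f then G m else 0) N
      (fun c2 m _ hlen => ⟨by simp [PySem.List.length_pySetD, hlen], fun i => by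
        rw [pvSStep _ _ _ hf i]
        have e : (((i:Int) = f ∧ f < (c2.length:Int)) ↔ ((i:Int) = f)) :=
          ⟨fun h => h.1, fun h => ⟨h, by omega⟩⟩
        rw [if_congr e rfl rfl]⟩) c2 hc2
    exact ⟨this.1, fun i => by rw [this.2 i, pvSumIf]⟩
  have hmem : ∀ f ∈ PySem.List.pyRange 1 u 1, 1 ≤ f ∧ f < u := by
    intro f hf
    have := (PySem.List.mem_pyRange_iff_of_pos (by omega) f).mp hf
    exact ⟨this.1, this.2.1⟩
  have := pvFoldPt (PySem.List.pyRange 1 u 1)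
    (fun c2 f => (PySem.List.pyRange f u f).foldl (fun c2 m =>
        PySem.List.pySetD c2 f (PySem.List.pyGetD c2 f 0 + G m)) c2)
    (fun f i => if (i : Int) = f then ((PySem.List.pyRange f u f).map G).sum else 0) N
    (fun c2 f hfmem hlen => by
      obtain ⟨h1, h2⟩ := hmem f hfmem
      exact (hinner f (by omega) h2 _ c2 hlen).imp id (fun h => fun i => h i))
    (List.replicate N 0) (by simp)
  exact ⟨this.1, fun i => by rw [this.2 i, pvGetDReplicate]; ring⟩

-- B's outer loop, pointwise
lemma pvBSide (G : Int → Int) (u : Int) (N : Nat) (hN : (N : Int) = u) :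
    ((PySem.List.pyRange 1 u 1).foldl (fun c2 m =>
        if G m ≠ 0 then pvDivLoop m (G m) 1 c2 else c2) (List.replicate N 0)).length = N ∧
    ∀ i : Nat, ((PySem.List.pyRange 1 u 1).foldl (fun c2 m =>
        if G m ≠ 0 then pvDivLoop m (G m) 1 c2 else c2) (List.replicate N 0)).getD i 0
      = ((PySem.List.pyRange 1 u 1).map (fun m =>
          if ((i : Int) ∣ m ∧ 1 ≤ (i : Int)) then G m else 0)).sum := by
  have hstep : ∀ c2 m, m ∈ PySem.List.pyRange 1 u 1 → c2.length = N →
      ((if G m ≠ 0 then pvDivLoop m (G m) 1 c2 else c2).length = N ∧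
       ∀ i : Nat, (if G m ≠ 0 then pvDivLoop m (G m) 1 c2 else c2).getD i 0
         = c2.getD i 0 + (if ((i : Int) ∣ m ∧ 1 ≤ (i : Int)) then G m else 0)) := by
    intro c2 m hm hlen
    have hmr := (PySem.List.mem_pyRange_iff_of_pos (by omega) m).mp hm
    have hm1 : 1 ≤ m := hmr.1
    have hmu : m < u := hmr.2.1
    by_cases hG : G m ≠ 0
    · obtain ⟨hl, hp⟩ := pvDivLoopPt m (G m) hm1 1 c2 le_rfl (by omega)
      simp only [if_pos hG]
      refine ⟨by omega, fun i => ?_⟩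
      rw [hp i]
      congr 1
      have e : (((i:Int) ∣ m ∧ 1 ≤ (i:Int) ∧ 1 ≤ min (i:Int) (m / (i:Int))) ↔
          ((i:Int) ∣ m ∧ 1 ≤ (i:Int))) := by
        constructor
        · exact fun h => ⟨h.1, h.2.1⟩
        · rintro ⟨h1, h2⟩
          have hr1 : (i:Int) * (m / (i:Int)) = m := Int.mul_ediv_cancel' h1
          have : 1 ≤ m / (i:Int) := by nlinarith
          exact ⟨h1, h2, by omega⟩
      rw [if_congr e rfl rfl]
    · push_neg at hG
      have he : (if G m ≠ 0 then pvDivLoop m (G m) 1 c2 else c2) = c2 := by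
        rw [hG]; simp
      rw [he]
      refine ⟨hlen, fun i => ?_⟩
      rw [hG]
      simp
  have := pvFoldPt (PySem.List.pyRange 1 u 1)
    (fun c2 m => if G m ≠ 0 then pvDivLoop m (G m) 1 c2 else c2)
    (fun m i => if ((i : Int) ∣ m ∧ 1 ≤ (i : Int)) then G m else 0) N
    hstep (List.replicate N 0) (by simp)
  exact ⟨this.1, fun i => by rw [this.2 i, pvGetDReplicate]; ring⟩

lemma pvListSum (f : Nat → Int) (n : Nat) : ((List.range n).map f).sum = ∑ k ∈ Finset.range n, f k := rfl

lemma pvCastDiv (W i : Nat) : (((W:Int)) / ((i:Int))).toNat = W / i := rfl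

lemma pvSums (G : Int → Int) (u : Int) (i : Nat) :
    ((PySem.List.pyRange 1 u 1).map (fun f =>
        if (i : Int) = f then ((PySem.List.pyRange f u f).map G).sum else 0)).sum
    = ((PySem.List.pyRange 1 u 1).map (fun m =>
        if ((i : Int) ∣ m ∧ 1 ≤ (i : Int)) then G m else 0)).sum := by
  rcases le_or_gt u 1 with h1 | h1
  · have hempty : PySem.List.pyRange 1 u 1 = [] := by
      rw [PySem.List.pyRange_of_pos _ _ one_pos, if_neg (by omega)]
      simp
    simp [hempty]
  · set W := (u - 1).toNat with hW
    have hWu : (W : Int) = u - 1 := by omega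
    have hrange : PySem.List.pyRange 1 u 1 = (List.range W).map (fun k : Nat => 1 + 1 * (k : Int)) := by
      rw [PySem.List.pyRange_of_pos _ _ one_pos, if_pos h1]
      congr 1
      rw [show u - 1 + 1 - 1 = u - 1 by ring, Int.ediv_one]
    rw [hrange, List.map_map, List.map_map, pvListSum, pvListSum]
    simp only [Function.comp]
    by_cases hi : 1 ≤ i ∧ (i : Int) < u
    · obtain ⟨hi1, hiu⟩ := hi
      have hiW : i ≤ W := by omega
      have lhs : (∑ k ∈ Finset.range W, if (i:Int) = 1 + 1 * (k:Int)
            then ((PySem.List.pyRange (1 + 1*(k:Int)) u (1 + 1*(k:Int))).map G).sum else 0)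
          = ((PySem.List.pyRange (i:Int) u (i:Int)).map G).sum := by
        rw [Finset.sum_eq_single_of_mem (i - 1) (Finset.mem_range.mpr (by omega))]
        · have harg : (1:Int) + 1 * ((i - 1 : Nat) : Int) = (i : Int) := by
            push_cast
            omega
          rw [harg, if_pos rfl]
        · intro b _ hb
          rw [if_neg (by push_cast; omega)]
      rw [lhs]
      have hKi : PySem.List.pyRange (i:Int) u (i:Int)
          = (List.range (W / i)).map (fun k : Nat => (i:Int) + (i:Int) * (k:Int)) := by
        rw [PySem.List.pyRange_of_pos _ _ (by omega : (0:Int) < (i:Int)), if_pos (by omega)]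
        congr 1
        have harg : u - (i:Int) + (i:Int) - 1 = (W : Int) := by omega
        rw [harg, pvCastDiv]
      rw [hKi, List.map_map, pvListSum]
      simp only [Function.comp]
      have hrhs : (∑ k ∈ Finset.range W, if ((i:Int) ∣ 1 + 1 * (k:Int) ∧ 1 ≤ (i:Int))
            then G (1 + 1 * (k:Int)) else 0)
          = ∑ k ∈ (Finset.range W).filter (fun k => i ∣ (k + 1)), G (1 + 1 * (k:Int)) := by
        rw [Finset.sum_filter]
        apply Finset.sum_congr rfl
        intro k _
        have hcast : ((i:Int) ∣ 1 + 1 * (k:Int) ∧ 1 ≤ (i:Int)) ↔ i ∣ (k + 1) := by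
          constructor
          · rintro ⟨hd, -⟩
            have : (i:Int) ∣ ((k + 1 : Nat) : Int) := by push_cast; convert hd using 1; ring
            exact_mod_cast this
          · intro hd
            refine ⟨?_, by exact_mod_cast hi1⟩
            have : (i:Int) ∣ ((k + 1 : Nat) : Int) := by exact_mod_cast hd
            convert this using 1
            push_cast
            ring
        rw [if_congr hcast rfl rfl]
      rw [hrhs]
      refine Finset.sum_nbij' (fun a => i * (a + 1) - 1) (fun b => (b + 1) / i - 1) ?_ ?_ ?_ ?_ ?_
      · intro a ha
        dsimp only
        have ha' := Finset.mem_range.mp ha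
        have h2 : i * (a + 1) ≤ W := by
          calc i * (a + 1) ≤ i * (W / i) := by
                exact Nat.mul_le_mul_left i (by omega)
            _ ≤ W := Nat.mul_div_le W i
        have h3 : 0 < i * (a + 1) := Nat.mul_pos (by omega) (by omega)
        refine Finset.mem_filter.mpr ⟨Finset.mem_range.mpr (by omega), ?_⟩
        have : i * (a + 1) - 1 + 1 = i * (a + 1) := by omega
        rw [this]
        exact Dvd.intro _ rfl
      · intro b hb
        dsimp only
        obtain ⟨hbW, hbd⟩ := Finset.mem_filter.mp hb
        have hbW' := Finset.mem_range.mp hbW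
        have h1' : 1 ≤ (b + 1) / i := (Nat.le_div_iff_mul_le (by omega)).mpr (by
          have := Nat.le_of_dvd (by omega) hbd
          omega)
        have h2 : (b + 1) / i ≤ W / i := Nat.div_le_div_right (by omega)
        exact Finset.mem_range.mpr (by omega)
      · intro a ha
        dsimp only
        have h3 : 0 < i * (a + 1) := Nat.mul_pos (by omega) (by omega)
        have he : i * (a + 1) - 1 + 1 = i * (a + 1) := by omega
        rw [he, Nat.mul_div_cancel_left _ (by omega : 0 < i)]
        omega
      · intro b hb
        dsimp only
        obtain ⟨hbW, hbd⟩ := Finset.mem_filter.mp hb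
        have h1' : 1 ≤ (b + 1) / i := (Nat.le_div_iff_mul_le (by omega)).mpr (by
          have := Nat.le_of_dvd (by omega) hbd
          omega)
        have he : ((b + 1) / i - 1) + 1 = (b + 1) / i := by omega
        rw [he, Nat.mul_div_cancel' hbd]
        omega
      · intro a ha
        dsimp only
        have ha' := Finset.mem_range.mp ha
        congr 1
        have h3 : 0 < i * (a + 1) := Nat.mul_pos (by omega) (by omega)
        have h5 : 1 ≤ i + i * a := by omega
        have he : i * (a + 1) = i + i * a := by ring
        rw [he, Nat.cast_sub h5]
        push_cast
        ring
    · rw [Finset.sum_eq_zero, Finset.sum_eq_zero]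
      · intro k hk
        have hkW := Finset.mem_range.mp hk
        rw [if_neg ?_]
        rintro ⟨hd, hi1⟩
        have : (i:Int) ≤ 1 + 1 * (k:Int) := Int.le_of_dvd (by omega) hd
        exact hi ⟨by exact_mod_cast hi1, by omega⟩
      · intro k hk
        have hkW := Finset.mem_range.mp hk
        rw [if_neg ?_]
        intro hik
        exact hi ⟨by omega, by omega⟩

-- wrappers instantiated with the shared count array c1 (statements in the ports' syntactic shape)
lemma pvASide' (c1 : List Int) (u : Int) (N : Nat) (hN : (N : Int) = u) :
    ((PySem.List.pyRange 1 u 1).foldl (fun c2 f =>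
        (PySem.List.pyRange f u f).foldl (fun c2 m =>
            PySem.List.pySetD c2 f (PySem.List.pyGetD c2 f 0 + PySem.List.pyGetD c1 m 0)) c2)
      (List.replicate N 0)).length = N ∧
    ∀ i : Nat, ((PySem.List.pyRange 1 u 1).foldl (fun c2 f =>
        (PySem.List.pyRange f u f).foldl (fun c2 m =>
            PySem.List.pySetD c2 f (PySem.List.pyGetD c2 f 0 + PySem.List.pyGetD c1 m 0)) c2)
      (List.replicate N 0)).getD i 0
      = ((PySem.List.pyRange 1 u 1).map (fun f =>
          if (i : Int) = f then ((PySem.List.pyRange f u f).map (fun m => PySem.List.pyGetD c1 m 0)).sum else 0)).sum :=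
  pvASide (fun m => PySem.List.pyGetD c1 m 0) u N hN

lemma pvBSide' (c1 : List Int) (u : Int) (N : Nat) (hN : (N : Int) = u) :
    ((PySem.List.pyRange 1 u 1).foldl (fun c2 m =>
        if PySem.List.pyGetD c1 m 0 ≠ 0 then pvDivLoop m (PySem.List.pyGetD c1 m 0) 1 c2 else c2)
      (List.replicate N 0)).length = N ∧
    ∀ i : Nat, ((PySem.List.pyRange 1 u 1).foldl (fun c2 m =>
        if PySem.List.pyGetD c1 m 0 ≠ 0 then pvDivLoop m (PySem.List.pyGetD c1 m 0) 1 c2 else c2)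
      (List.replicate N 0)).getD i 0
      = ((PySem.List.pyRange 1 u 1).map (fun m =>
          if ((i : Int) ∣ m ∧ 1 ≤ (i : Int)) then PySem.List.pyGetD c1 m 0 else 0)).sum :=
  pvBSide (fun m => PySem.List.pyGetD c1 m 0) u N hN

lemma pvSums' (c1 : List Int) (u : Int) (i : Nat) :
    ((PySem.List.pyRange 1 u 1).map (fun f =>
        if (i : Int) = f then ((PySem.List.pyRange f u f).map (fun m => PySem.List.pyGetD c1 m 0)).sum else 0)).sum
    = ((PySem.List.pyRange 1 u 1).map (fun m =>
        if ((i : Int) ∣ m ∧ 1 ≤ (i : Int)) then PySem.List.pyGetD c1 m 0 else 0)).sum :=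
  pvSums (fun m => PySem.List.pyGetD c1 m 0) u i

-- ===== VERDICT (by name: the statement is the Claim_ definition above) =====
theorem countMulti_spec : Claim_equal_countMulti := by
  intro nums _ hpre
  unfold Spec_countMulti countMulti countMulti_alt
  obtain ⟨hne, mx0, hmem, hmx00, hbound⟩ := hpre
  cases h : PySem.List.max? nums (fun x => x) with
  | none => exact absurd ((PySem.List.max?_eq_none_iff nums (fun x => x)).mp h) hne
  | some mx =>
    have hmax : mx0 ≤ mx := PySem.List.max?_isMax h mx0 hmem
    have hmx : 0 ≤ mx := le_trans hmx00 hmax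
    have hNu : (((mx + 1).toNat : Nat) : Int) = mx + 1 := by omega
    dsimp only
    obtain ⟨hAlen, hApt⟩ := pvASide' (pvBuildC1 nums (mx + 1)) (mx + 1) (mx + 1).toNat hNu
    obtain ⟨hBlen, hBpt⟩ := pvBSide' (pvBuildC1 nums (mx + 1)) (mx + 1) (mx + 1).toNat hNu
    apply List.ext_getElem (by rw [hAlen, hBlen])
    intro n h1 h2
    rw [← List.getD_eq_getElem _ 0 h1, ← List.getD_eq_getElem _ 0 h2, hApt n, hBpt n]
    exact pvSums' (pvBuildC1 nums (mx + 1)) (mx + 1) n
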